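-- pv_equiv track=rewrite | github.com/edoardottt/programming-fundamentals | programming_lab/lab241019/vocali_in_parole.py | vocali_in_parole
-- ===== SOURCE A (Python) =====
-- def vocali_in_parole(S):
--     diz = {vocale:[] for vocale in 'aeiou'}
--     for vocale in diz:
--         for parola in S.split():
--             if vocale in parola:
--                 diz[vocale].append(parola)
--     l = []
--     for vocale, lista in diz.items():
--         if lista == []:
--             l.append(vocale)
--     for vocale in l:
--         del diz[vocale]
--     return diz
-- ===== SOURCE B (Python) =====
-- def vocali_in_parole(S):
--     buckets = {}
--     for w in S.split():
--         for v in dict.fromkeys(c for c in w if c in 'aeiou'):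
--             buckets.setdefault(v, []).append(w)
--     return {v: buckets[v] for v in 'aeiou' if v in buckets}
-- ===== Notes on version B (the rewrite author's own statement) =====
-- stated objective: alternative
-- what changed: B starts from an empty dict and scans each word's characters once, bucketing the word under the (deduplicated) vowels it actually contains via setdefault, then emits the buckets in vowel order a,e,i,o,u; A instead pre-creates all five buckets, runs five substring-containment scans over a repeatedly re-split S, and deletes empty buckets with a collect-then-delete pass.
import Mathlib
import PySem

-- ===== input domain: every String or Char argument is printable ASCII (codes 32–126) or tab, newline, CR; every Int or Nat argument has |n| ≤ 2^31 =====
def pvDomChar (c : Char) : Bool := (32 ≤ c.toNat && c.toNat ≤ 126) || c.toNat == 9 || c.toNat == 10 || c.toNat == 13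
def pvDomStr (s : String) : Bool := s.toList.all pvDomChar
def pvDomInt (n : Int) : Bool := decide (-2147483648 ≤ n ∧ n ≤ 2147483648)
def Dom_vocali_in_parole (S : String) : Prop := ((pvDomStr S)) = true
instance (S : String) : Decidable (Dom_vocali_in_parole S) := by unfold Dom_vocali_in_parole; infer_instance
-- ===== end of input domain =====

-- B builds the buckets lazily from an empty dict, scanning each word's characters once for
-- its (deduplicated) vowels, then emits them in 'aeiou' order, instead of A's five
-- substring scans over a re-split S plus a collect-then-delete pass (objective: alternative).

-- ===== PORT A =====
def vocali_in_parole (S : String) : List (String × List String) :=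
  -- diz = {vocale: [] for vocale in 'aeiou'}
  let diz0 : PySem.Dict String (List String) :=
    (["a", "e", "i", "o", "u"]).foldl (fun d vocale => d.insert vocale []) PySem.Dict.empty
  -- for vocale in diz: for parola in S.split(): if vocale in parola: diz[vocale].append(parola)
  let diz1 := diz0.keys.foldl
    (fun d vocale =>
      (PySem.Str.split₀ S).foldl
        (fun d parola =>
          if PySem.Str.isIn vocale parola then d.modify vocale [] (fun l => l ++ [parola]) else d)
        d)
    diz0
  -- l = []; for vocale, lista in diz.items(): if lista == []: l.append(vocale)
  let l := diz1.items.foldl (fun l p => if p.2 = ([] : List String) then l ++ [p.1] else l)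
    ([] : List String)
  -- for vocale in l: del diz[vocale]
  let diz2 := l.foldl (fun d vocale => d.erase vocale) diz1
  diz2.items

-- ===== PORT B =====
def vocali_in_parole_alt (S : String) : List (String × List String) :=
  -- buckets = {}
  -- for w in S.split():
  --   for v in dict.fromkeys(c for c in w if c in 'aeiou'):   (each c is a 1-char string)
  --     buckets.setdefault(v, []).append(w)                   (= modify v [] (· ++ [w]))
  let buckets := (PySem.Str.split₀ S).foldl
    (fun d w =>
      (PySem.List.dedup ((w.toList.filter
            (fun c => PySem.Str.isIn (String.ofList [c]) "aeiou")).map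
          (fun c => String.ofList [c]))).foldl
        (fun d v => d.modify v [] (fun l => l ++ [w])) d)
    (PySem.Dict.empty : PySem.Dict String (List String))
  -- {v: buckets[v] for v in 'aeiou' if v in buckets}  (buckets[v] under the guard = getD v [])
  ((["a", "e", "i", "o", "u"]).foldl
    (fun d v => if buckets.contains v then d.insert v (buckets.getD v []) else d)
    (PySem.Dict.empty : PySem.Dict String (List String))).items

-- ===== PRECONDITION & SPEC =====
def Spec_vocali_in_parole (S : String) (out : List (String × List String)) : Prop := out = vocali_in_parole_alt S
instance (S : String) (out : List (String × List String)) : Decidable (Spec_vocali_in_parole S out) := by unfold Spec_vocali_in_parole; infer_instance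

-- ===== CLAIM (what is proved, stated in full; the proofs are below) =====
def Claim_equal_vocali_in_parole : Prop := ∀ (S : String), Dom_vocali_in_parole S → Spec_vocali_in_parole S (vocali_in_parole S)

-- ===== LEMMAS AND PROOFS =====

-- the five vowel keys
def pvVowels : List String := ["a", "e", "i", "o", "u"]

-- the canonical bucket for vowel v
def pvBucket (S v : String) : List String :=
  (PySem.Str.split₀ S).filter (fun w => PySem.Str.isIn v w)

-- the canonical final answer both ports compute
def pvCanon (S : String) : List (String × List String) :=
  (pvVowels.filter (fun v => ¬ (pvBucket S v = []))).map (fun v => (v, pvBucket S v))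

-- A's inner word loop, for one fixed vowel: getD per key
theorem pv_innerA_getD (v k : String) (W : List String) (d : PySem.Dict String (List String)) :
    (W.foldl (fun d w => if PySem.Str.isIn v w then d.modify v [] (fun l => l ++ [w]) else d) d).getD k []
      = if k = v then d.getD v [] ++ W.filter (fun w => PySem.Str.isIn v w) else d.getD k [] := by
  induction W generalizing d with
  | nil => by_cases hk : k = v <;> simp [hk]
  | cons w t ih =>
    simp only [List.foldl_cons, List.filter_cons]
    by_cases hw : PySem.Str.isIn v w = true
    · rw [if_pos hw, if_pos hw, ih]
      by_cases hk : k = v <;> simp [hk, PySem.Dict.getD_modify]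
    · rw [if_neg hw, if_neg hw, ih]

-- a modify of an already-present key preserves the key list
theorem pv_keys_modify_of_contains {d : PySem.Dict String (List String)} {v : String}
    (h : d.contains v = true) (d0 : List String) (f : List String → List String) :
    (d.modify v d0 f).keys = d.keys := by
  rw [PySem.Dict.keys_modify, PySem.Dict.keys_insert_of_contains d _ h]

-- A's inner word loop preserves keys (when the vowel is a key)
theorem pv_innerA_keys (v : String) (W : List String) (d : PySem.Dict String (List String))
    (h : d.contains v = true) :
    (W.foldl (fun d w => if PySem.Str.isIn v w then d.modify v [] (fun l => l ++ [w]) else d) d).keys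
      = d.keys := by
  induction W generalizing d with
  | nil => rfl
  | cons w t ih =>
    simp only [List.foldl_cons]
    by_cases hw : PySem.Str.isIn v w = true
    · rw [if_pos hw, ih _ (by simp [PySem.Dict.contains_modify]), pv_keys_modify_of_contains h]
    · rw [if_neg hw, ih _ h]

-- A's outer vowel loop: keys preserved and per-key buckets accumulated
theorem pv_outerA (V : List String) (S : String) (d : PySem.Dict String (List String))
    (hV : V.Nodup) (hsub : ∀ v ∈ V, v ∈ d.keys) :
    (V.foldl
        (fun d v =>
          (PySem.Str.split₀ S).foldl
            (fun d w => if PySem.Str.isIn v w then d.modify v [] (fun l => l ++ [w]) else d) d)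
        d).keys = d.keys ∧
    ∀ k, (V.foldl
        (fun d v =>
          (PySem.Str.split₀ S).foldl
            (fun d w => if PySem.Str.isIn v w then d.modify v [] (fun l => l ++ [w]) else d) d)
        d).getD k []
      = if k ∈ V then d.getD k [] ++ pvBucket S k else d.getD k [] := by
  induction V generalizing d with
  | nil => simp
  | cons v t ih =>
    have hvmem : d.contains v = true := by
      rw [PySem.Dict.contains_iff_mem_keys]; exact hsub v (by simp)
    simp only [List.foldl_cons]
    set d' := (PySem.Str.split₀ S).foldl
      (fun d w => if PySem.Str.isIn v w then d.modify v [] (fun l => l ++ [w]) else d) d with hd'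
    have hkeys' : d'.keys = d.keys := pv_innerA_keys v _ d hvmem
    have hsub' : ∀ u ∈ t, u ∈ d'.keys := by
      intro u hu; rw [hkeys']; exact hsub u (by simp [hu])
    obtain ⟨hk, hg⟩ := ih d' hV.of_cons hsub'
    refine ⟨by rw [hk, hkeys'], ?_⟩
    intro k
    rw [hg k]
    have hgd' : ∀ k', d'.getD k' []
        = if k' = v then d.getD v [] ++ pvBucket S v else d.getD k' [] := by
      intro k'; exact pv_innerA_getD v k' _ d
    by_cases hkv : k = v
    · subst hkv
      have hkt : k ∉ t := (List.nodup_cons.mp hV).1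
      simp [hkt, hgd', pvBucket]
    · by_cases hkt : k ∈ t <;> simp [hkv, hkt, hgd' k]

-- items of a dict with nodup keys, reconstructed from keys and getD
theorem pv_items_eq (d : PySem.Dict String (List String)) (h : d.keys.Nodup) :
    d.items = d.keys.map (fun k => (k, d.getD k [])) := by
  have h1 : d.keys.map (fun k => (k, d.getD k []))
      = d.items.map (fun p => (p.1, d.getD p.1 [])) := by
    show (d.items.map (fun p => p.1)).map (fun k => (k, d.getD k [])) = _
    rw [List.map_map]; rfl
  rw [h1]
  have h2 : ∀ p ∈ d.items, (p.1, d.getD p.1 []) = p := by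
    intro p hp
    have hg : d.get? p.1 = some p.2 :=
      PySem.Dict.get?_of_mem_items d (by simpa using hp) h
    rw [PySem.Dict.getD_eq_get?_getD, hg]
    rfl
  rw [List.map_congr_left h2]
  simp

-- erasing a list of keys filters the items
theorem pv_foldl_erase_items (l : List String) (d : PySem.Dict String (List String)) :
    (l.foldl (fun d k => d.erase k) d).items
      = d.items.filter (fun p => !(List.elem p.1 l)) := by
  induction l generalizing d with
  | nil => simp
  | cons k t ih =>
    simp only [List.foldl_cons, ih]
    show (d.items.filter (fun p => !(p.1 == k))).filter (fun p => !(List.elem p.1 t)) = _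
    rw [List.filter_filter]
    apply List.filter_congr
    intro p _
    by_cases h1 : p.1 = k <;> by_cases h2 : p.1 ∈ t <;> simp [h1, h2]

-- A equals the canonical answer
theorem pv_A_canon (S : String) : vocali_in_parole S = pvCanon S := by
  unfold vocali_in_parole
  dsimp only
  set diz0 : PySem.Dict String (List String) :=
    (["a", "e", "i", "o", "u"]).foldl (fun d vocale => d.insert vocale []) PySem.Dict.empty with hdiz0
  have hkeys0 : diz0.keys = pvVowels := by decide
  have hgd0 : ∀ k, diz0.getD k [] = [] := by
    intro k
    rw [PySem.Dict.getD_eq_get?_getD]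
    by_cases hk : k ∈ pvVowels
    · fin_cases hk <;> rfl
    · have hnone : diz0.get? k = none := by
        rw [PySem.Dict.get?_eq_none_iff_not_mem_keys, hkeys0]; exact hk
      rw [hnone]; rfl
  rw [hkeys0]
  obtain ⟨hk1, hg1⟩ := pv_outerA pvVowels S diz0 (by decide) (by rw [hkeys0]; simp)
  set diz1 := pvVowels.foldl
    (fun d v =>
      (PySem.Str.split₀ S).foldl
        (fun d w => if PySem.Str.isIn v w then d.modify v [] (fun l => l ++ [w]) else d) d)
    diz0 with hdiz1
  have hkeys1 : diz1.keys = pvVowels := by rw [hk1, hkeys0]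
  have hitems1 : diz1.items = pvVowels.map (fun v => (v, pvBucket S v)) := by
    rw [pv_items_eq diz1 (by rw [hkeys1]; decide), hkeys1]
    apply List.map_congr_left
    intro v hv
    rw [hg1 v]
    simp [hv, hgd0]
  have hl : diz1.items.foldl
      (fun l p => if p.2 = ([] : List String) then l ++ [p.1] else l) ([] : List String)
      = (pvVowels.filter (fun v => pvBucket S v = [])) := by
    rw [hitems1]
    have hfold : ∀ (acc : List String) (L : List (String × List String)),
        L.foldl (fun l p => if p.2 = ([] : List String) then l ++ [p.1] else l) acc
          = acc ++ (L.filter (fun p => p.2 = [])).map (fun p => p.1) := by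
      intro acc L
      induction L generalizing acc with
      | nil => simp
      | cons p t ih =>
        by_cases h : p.2 = ([] : List String) <;> simp [h, ih]
    rw [hfold, List.filter_map]
    simp [Function.comp_def]
  rw [hl, pv_foldl_erase_items, hitems1, List.filter_map]
  unfold pvCanon
  congr 1
  apply List.filter_congr
  intro v hv
  simp only [Function.comp_def]
  by_cases hb : pvBucket S v = [] <;>
    simp [hb, hv, List.elem_eq_contains, List.contains_eq_mem, List.mem_filter]

-- B: the deduplicated list of vowels occurring in word w (as 1-char strings)
def pvVW (w : String) : List String :=
  PySem.List.dedup ((w.toList.filter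
      (fun c => PySem.Str.isIn (String.ofList [c]) "aeiou")).map
    (fun c => String.ofList [c]))

-- a 1-char substring test is character membership
theorem pv_isIn_singleton (c : Char) (s : String) :
    PySem.Str.isIn (String.ofList [c]) s = s.toList.contains c := by
  rw [show PySem.Str.isIn (String.ofList [c]) s = PySem.Chars.isIn [c] s.toList from by simp]
  by_cases h : c ∈ s.toList
  · have h1 : PySem.Chars.isIn [c] s.toList = true := by
      rw [PySem.Chars.isIn_iff_infix]
      obtain ⟨l₁, l₂, hl2⟩ := List.append_of_mem h
      exact ⟨l₁, l₂, by simp [hl2]⟩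
    rw [h1]; simp [h]
  · have h1 : PySem.Chars.isIn [c] s.toList = false := by
      rw [Bool.eq_false_iff]
      intro hc
      rw [PySem.Chars.isIn_iff_infix] at hc
      exact h (hc.subset (by simp))
    rw [h1]; simp [h]

-- membership in pvVW, for a vowel key
theorem pv_mem_VW (v w : String) (hv : v ∈ pvVowels) :
    v ∈ pvVW w ↔ PySem.Str.isIn v w = true := by
  obtain ⟨c0, hvc, hp⟩ : ∃ c0, v = String.ofList [c0] ∧
      PySem.Str.isIn (String.ofList [c0]) "aeiou" = true := by
    fin_cases hv
    exacts [⟨'a', by decide, by decide⟩, ⟨'e', by decide, by decide⟩,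
      ⟨'i', by decide, by decide⟩, ⟨'o', by decide, by decide⟩, ⟨'u', by decide, by decide⟩]
  subst hvc
  unfold pvVW
  rw [PySem.List.mem_dedup]
  constructor
  · intro h
    simp only [List.mem_map, List.mem_filter] at h
    obtain ⟨c, ⟨hc, -⟩, hcv⟩ := h
    have hcc : c = c0 := by
      have := congrArg String.toList hcv; simpa using this
    subst hcc
    rw [pv_isIn_singleton]
    simpa using hc
  · intro h
    rw [pv_isIn_singleton] at h
    exact List.mem_map.mpr ⟨c0, List.mem_filter.mpr ⟨by simpa using h, hp⟩, rfl⟩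

-- B's inner fold over a nodup key list: getD per key
theorem pv_fold_modify_getD (L : List String) (hL : L.Nodup) (w v : String)
    (d : PySem.Dict String (List String)) :
    (L.foldl (fun d k => d.modify k [] (fun l => l ++ [w])) d).getD v []
      = if v ∈ L then d.getD v [] ++ [w] else d.getD v [] := by
  induction L generalizing d with
  | nil => simp
  | cons k t ih =>
    simp only [List.foldl_cons]
    rw [ih hL.of_cons, PySem.Dict.getD_modify]
    by_cases hvk : v = k
    · subst hvk
      have hvt : v ∉ t := (List.nodup_cons.mp hL).1
      simp [hvt]
    · by_cases hvt : v ∈ t <;> simp [hvk, hvt]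

-- B's inner fold: contains per key
theorem pv_fold_modify_contains (L : List String) (w v : String)
    (d : PySem.Dict String (List String)) :
    (L.foldl (fun d k => d.modify k [] (fun l => l ++ [w])) d).contains v
      = (decide (v ∈ L) || d.contains v) := by
  induction L generalizing d with
  | nil => simp
  | cons k t ih =>
    simp only [List.foldl_cons]
    rw [ih, PySem.Dict.contains_modify]
    by_cases hvk : v = k <;> by_cases hvt : v ∈ t <;> simp [hvk, hvt]

-- B's outer word loop: getD and contains per vowel key
theorem pv_outerB (W : List String) (d : PySem.Dict String (List String)) :
    ∀ v ∈ pvVowels,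
      (W.foldl (fun d w => (pvVW w).foldl (fun d k => d.modify k [] (fun l => l ++ [w])) d) d).getD v []
        = d.getD v [] ++ W.filter (fun w => PySem.Str.isIn v w) ∧
      (W.foldl (fun d w => (pvVW w).foldl (fun d k => d.modify k [] (fun l => l ++ [w])) d) d).contains v
        = (d.contains v || W.any (fun w => PySem.Str.isIn v w)) := by
  induction W generalizing d with
  | nil => intro v _; simp
  | cons w t ih =>
    intro v hv
    simp only [List.foldl_cons, List.filter_cons, List.any_cons]
    set d' := (pvVW w).foldl (fun d k => d.modify k [] (fun l => l ++ [w])) d with hd'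
    obtain ⟨hg, hc⟩ := ih d' v hv
    have hnd : (pvVW w).Nodup := PySem.List.nodup_dedup _
    have hgd' : d'.getD v []
        = if v ∈ pvVW w then d.getD v [] ++ [w] else d.getD v [] :=
      pv_fold_modify_getD _ hnd w v d
    have hcd' : d'.contains v = (decide (v ∈ pvVW w) || d.contains v) :=
      pv_fold_modify_contains _ w v d
    by_cases hw : PySem.Str.isIn v w = true
    · have hmem : v ∈ pvVW w := (pv_mem_VW v w hv).mpr hw
      have hwt : PySem.Chars.isIn v.toList w.toList = true := by simpa using hw
      constructor
      · rw [hg, hgd', if_pos hmem, if_pos hw]; simp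
      · rw [hc, hcd']; simp [hmem, hwt]
    · have hmem : v ∉ pvVW w := fun h => hw ((pv_mem_VW v w hv).mp h)
      have hwf : PySem.Chars.isIn v.toList w.toList = false := by
        simpa using Bool.eq_false_iff.mpr hw
      constructor
      · rw [hg, hgd', if_neg hmem, if_neg hw]
      · rw [hc, hcd']
        simp [hmem, hwf]

-- a conditional insert loop is an insert loop over the filtered key list
theorem pv_foldl_if_insert (L : List String) (c : String → Bool) (g : String → List String)
    (d : PySem.Dict String (List String)) :
    L.foldl (fun d v => if c v then d.insert v (g v) else d) d
      = (L.filter c).foldl (fun d v => d.insert v (g v)) d := by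
  induction L generalizing d with
  | nil => rfl
  | cons v t ih =>
    simp only [List.foldl_cons, List.filter_cons]
    by_cases h : c v = true
    · rw [if_pos h, if_pos h]; simp [ih]
    · rw [if_neg h, if_neg h]; exact ih d

-- B equals the canonical answer
theorem pv_B_canon (S : String) : vocali_in_parole_alt S = pvCanon S := by
  unfold vocali_in_parole_alt
  dsimp only
  rw [show (fun (d : PySem.Dict String (List String)) (w : String) =>
        (PySem.List.dedup ((w.toList.filter
              (fun c => PySem.Str.isIn (String.ofList [c]) "aeiou")).map
            (fun c => String.ofList [c]))).foldl
          (fun d v => d.modify v [] (fun l => l ++ [w])) d)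
      = (fun d w => (pvVW w).foldl (fun d k => d.modify k [] (fun l => l ++ [w])) d) from rfl]
  set buckets := (PySem.Str.split₀ S).foldl
    (fun d w => (pvVW w).foldl (fun d k => d.modify k [] (fun l => l ++ [w])) d)
    (PySem.Dict.empty : PySem.Dict String (List String)) with hb
  have hspec : ∀ v ∈ pvVowels,
      buckets.getD v [] = pvBucket S v ∧
      buckets.contains v = (PySem.Str.split₀ S).any (fun w => PySem.Str.isIn v w) := by
    intro v hv
    obtain ⟨hg, hc⟩ := pv_outerB (PySem.Str.split₀ S) PySem.Dict.empty v hv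
    refine ⟨?_, ?_⟩
    · rw [hg]; simp [pvBucket]
    · rw [hc]; simp
  rw [show (["a", "e", "i", "o", "u"] : List String) = pvVowels from rfl]
  rw [pv_foldl_if_insert]
  have hnodup : ((pvVowels.filter (fun v => buckets.contains v)).map (fun v => v)).Nodup := by
    simp only [List.map_id']
    exact List.Nodup.filter _ (by decide)
  rw [PySem.Dict.items_foldl_insert_fresh _ (fun v => v) (fun v => buckets.getD v []) _
        (fun a _ => PySem.Dict.contains_empty _) hnodup]
  rw [show (PySem.Dict.empty : PySem.Dict String (List String)).items = [] from rfl]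
  simp only [List.nil_append]
  unfold pvCanon
  rw [List.map_congr_left
      (fun v hv => by
        rw [(hspec v (List.mem_of_mem_filter hv)).1])]
  congr 1
  apply List.filter_congr
  intro v hv
  rw [(hspec v hv).2]
  by_cases hne : pvBucket S v = []
  · have hfalse : (PySem.Str.split₀ S).any (fun w => PySem.Str.isIn v w) = false := by
      rw [List.any_eq_false]
      intro w hw
      intro hc
      have : w ∈ pvBucket S v := List.mem_filter.mpr ⟨hw, hc⟩
      rw [hne] at this; exact absurd this (List.not_mem_nil)
    rw [hfalse]; simp [hne]
  · have htrue : (PySem.Str.split₀ S).any (fun w => PySem.Str.isIn v w) = true := by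
      rw [List.any_eq_true]
      obtain ⟨w, hw⟩ := List.exists_mem_of_ne_nil _ hne
      exact ⟨w, List.mem_of_mem_filter hw, (List.mem_filter.mp hw).2⟩
    rw [htrue]; simp [hne]

-- ===== VERDICT (by name: the statement is the Claim_ definition above) =====
theorem vocali_in_parole_spec : Claim_equal_vocali_in_parole := by
  intro S _
  unfold Spec_vocali_in_parole
  rw [pv_A_canon, pv_B_canon]
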